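-- pv_equiv track=rewrite | github.com/Vardandatasciences/RISKAVAIRE_TPRM | grc_backend/grc/routes/uploadNist/index_content_extractor.py | compute_ranges_hierarchical
-- ===== SOURCE A (Python) =====
-- def compute_ranges_hierarchical(flat_items, doc_page_count):
--     items = [it for it in flat_items if it.get("start") is not None]
--     items.sort(key=lambda x: x["start"])
--     for i, itm in enumerate(items):
--         lvl = itm["level"]
--         end_page = doc_page_count - 1
--         for nxt in items[i+1:]:
--             if nxt["level"] <= lvl and nxt["start"] > itm["start"]:
--                 end_page = nxt["start"] - 1
--                 break
--         if end_page < itm["start"]: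
--             end_page = itm["start"]
--         itm["end"] = end_page
--     return items
-- ===== SOURCE B (Python) =====
-- def compute_ranges_hierarchical(flat_items, doc_page_count):
--     items = sorted([it for it in flat_items if it.get("start") is not None],
--                    key=lambda x: x["start"])
--     # frontier: (level, min start of a strictly-later item with that level or below);
--     # levels strictly increasing, starts non-increasing.  One right-to-left sweep over
--     # the start-groups: query by binary search, then push the group's items.
--     frontier = []
--     i = len(items) - 1
--     while i >= 0:
--         g = i
--         while g > 0 and items[g - 1]["start"] == items[i]["start"]:
--             g -= 1
--         for j in range(g, i + 1):
--             itm = items[j]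
--             lo, hi = 0, len(frontier)
--             while lo < hi:
--                 mid = (lo + hi) // 2
--                 if frontier[mid][0] <= itm["level"]:
--                     lo = mid + 1
--                 else:
--                     hi = mid
--             end = frontier[lo - 1][1] - 1 if lo else doc_page_count - 1
--             itm["end"] = end if end >= itm["start"] else itm["start"]
--         for j in range(g, i + 1):
--             itm = items[j]
--             while frontier and frontier[-1][0] >= itm["level"]:
--                 frontier.pop()
--             frontier.append((itm["level"], itm["start"]))
--         i = g - 1
--     return items
-- ===== Notes on version B (the rewrite author's own statement) =====
-- stated objective: alternative
-- what changed: Replaces A's per-item forward scan over later items by a single right-to-left sweep over the start-groups of the sorted list that maintains a monotonic (level, next-start) frontier queried by binary search.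
import Mathlib
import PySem

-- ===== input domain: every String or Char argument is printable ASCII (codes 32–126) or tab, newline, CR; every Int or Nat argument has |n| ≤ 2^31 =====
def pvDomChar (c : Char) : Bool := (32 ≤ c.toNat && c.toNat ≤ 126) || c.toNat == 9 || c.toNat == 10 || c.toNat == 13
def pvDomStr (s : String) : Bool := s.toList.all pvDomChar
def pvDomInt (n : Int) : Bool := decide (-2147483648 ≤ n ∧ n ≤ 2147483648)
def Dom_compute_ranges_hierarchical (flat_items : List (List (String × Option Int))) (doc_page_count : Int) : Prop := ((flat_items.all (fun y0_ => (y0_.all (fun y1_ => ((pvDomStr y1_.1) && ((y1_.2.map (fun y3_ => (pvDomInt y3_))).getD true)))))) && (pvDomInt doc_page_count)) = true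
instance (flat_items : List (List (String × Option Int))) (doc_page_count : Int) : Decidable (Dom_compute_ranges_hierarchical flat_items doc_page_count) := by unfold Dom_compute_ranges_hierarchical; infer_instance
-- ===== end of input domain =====

-- B replaces A's per-item forward scan over later items by one right-to-left sweep over
-- the start-groups of the sorted list with a monotonic (level, next-start) frontier
-- queried by binary search (an alternative algorithm).  Both versions mutate the item
-- dicts in place in Python ("end" key); the equivalence proved here is about the
-- returned value (which contains those same dicts).

abbrev pvItem := List (String × Option Int)

-- it.get(k) where a missing key and an explicit None are both Python None
def pvGetOpt (it : pvItem) (k : String) : Option Int := (PySem.Dict.mk it).getD k none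
-- itm["start"] / itm["level"] as ints; total via default 0, Pre_ excludes the raising inputs
def pvStart (it : pvItem) : Int := (pvGetOpt it "start").getD 0
def pvLevel (it : pvItem) : Int := (pvGetOpt it "level").getD 0
-- itm["end"] = e
def pvSetEnd (it : pvItem) (e : Int) : pvItem := ((PySem.Dict.mk it).insert "end" (some e)).items

-- ===== PORT A =====
-- inner 'for nxt in items[i+1:]: if …: end_page = nxt["start"] - 1; break' loop
def aScan (lvl s doc : Int) : List pvItem → Int
  | [] => doc - 1
  | nxt :: rest =>
      if pvLevel nxt ≤ lvl ∧ s < pvStart nxt then pvStart nxt - 1 else aScan lvl s doc rest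

-- one iteration of 'for i, itm in enumerate(items)' (mutates position i of the list)
def aStep (doc : Int) (items : List pvItem) (i : Nat) : List pvItem :=
  let itm := items.getD i []
  let e := aScan (pvLevel itm) (pvStart itm) doc (items.drop (i + 1))
  let e2 := if e < pvStart itm then pvStart itm else e
  items.set i (pvSetEnd itm e2)

def compute_ranges_hierarchical (flat_items : List (List (String × Option Int))) (doc_page_count : Int) : List (List (String × Option Int)) :=
  let items := PySem.List.sorted (flat_items.filter (fun it => (pvGetOpt it "start").isSome)) (fun x => pvStart x) false
  (List.range items.length).foldl (aStep doc_page_count) items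

-- ===== PORT B =====
-- 'g = i; while g > 0 and items[g-1]["start"] == items[i]["start"]: g -= 1'
def bG (items : List pvItem) (S : Int) : Nat → Nat
  | 0 => 0
  | g + 1 => if pvStart (items.getD g []) = S then bG items S g else g + 1

-- 'lo, hi = 0, len(frontier); while lo < hi: …'  (hand-written bisect in Source B)
def bSearch (front : List (Int × Int)) (L : Int) (lo hi : Nat) : Nat :=
  if _h : lo < hi then
    let mid := (lo + hi) / 2
    if (front.getD mid (0, 0)).1 ≤ L then bSearch front L (mid + 1) hi else bSearch front L lo mid
  else lo
termination_by hi - lo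
decreasing_by all_goals omega

-- the first 'for j in range(g, i+1)' body: query the frontier, set itm["end"]
def bQuery (doc : Int) (front : List (Int × Int)) (itm : pvItem) : pvItem :=
  let lo := bSearch front (pvLevel itm) 0 front.length
  let e := if lo ≠ 0 then (front.getD (lo - 1) (0, 0)).2 - 1 else doc - 1
  pvSetEnd itm (if e ≥ pvStart itm then e else pvStart itm)

-- 'while frontier and frontier[-1][0] >= itm["level"]: frontier.pop()'
def bPop (L : Int) (front : List (Int × Int)) : List (Int × Int) :=
  if h : front ≠ [] then
    if (front.getLast h).1 ≥ L then bPop L front.dropLast else front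
  else front
termination_by front.length
decreasing_by
  simp only [List.length_dropLast]
  have : 0 < front.length := List.length_pos_iff.mpr h
  omega

-- the second 'for j in range(g, i+1)' body: pop then append
def bPush (front : List (Int × Int)) (itm : pvItem) : List (Int × Int) :=
  bPop (pvLevel itm) front ++ [(pvLevel itm, pvStart itm)]

-- termination lemma for the outer while loop (the port cites it in decreasing_by)
theorem bG_le (items : List pvItem) (S : Int) : ∀ g, bG items S g ≤ g := by
  intro g
  induction g with
  | zero => simp [bG]
  | succ g ih => unfold bG; split <;> omega

-- the outer 'while i >= 0' loop; fuel = i + 1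
def bMain (doc : Int) : Nat → List pvItem → List (Int × Int) → List pvItem
  | 0, items, _ => items
  | i + 1, items, front =>
      let S := pvStart (items.getD i [])
      let g := bG items S i
      let seg := ((items.drop g).take (i + 1 - g)).map (bQuery doc front)
      let items' := items.take g ++ seg ++ items.drop (i + 1)
      let front' := seg.foldl bPush front
      bMain doc g items' front'
termination_by fuel => fuel
decreasing_by exact Nat.lt_succ_of_le (bG_le items S i)

def compute_ranges_hierarchical_alt (flat_items : List (List (String × Option Int))) (doc_page_count : Int) : List (List (String × Option Int)) :=
  let items := PySem.List.sorted (flat_items.filter (fun it => (pvGetOpt it "start").isSome)) (fun x => pvStart x) false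
  bMain doc_page_count items.length items []

-- ===== PRECONDITION & SPEC =====
-- Pre_ excludes inputs holding an item with a usable "start" but no integer "level":
-- there A raises KeyError/TypeError on all but degenerate inputs (an item whose level is
-- never compared, e.g. a lone item with level None, still returns — cited in the claim).
def Pre_compute_ranges_hierarchical (flat_items : List (List (String × Option Int))) (doc_page_count : Int) : Prop :=
  ∀ it ∈ flat_items, (pvGetOpt it "start").isSome → (pvGetOpt it "level").isSome
instance (flat_items : List (List (String × Option Int))) (doc_page_count : Int) : Decidable (Pre_compute_ranges_hierarchical flat_items doc_page_count) := by unfold Pre_compute_ranges_hierarchical; infer_instance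

def pvWitness_compute_ranges_hierarchical : (List (List (String × Option Int))) × Int :=
  ([[("start", some 0), ("level", some 1)], [("start", some 2), ("level", some 0)]], 5)

def Spec_compute_ranges_hierarchical (flat_items : List (List (String × Option Int))) (doc_page_count : Int) (out : List (List (String × Option Int))) : Prop := out = compute_ranges_hierarchical_alt flat_items doc_page_count
instance (flat_items : List (List (String × Option Int))) (doc_page_count : Int) (out : List (List (String × Option Int))) : Decidable (Spec_compute_ranges_hierarchical flat_items doc_page_count out) := by unfold Spec_compute_ranges_hierarchical; infer_instance

-- ===== CLAIM (what is proved, stated in full; the proofs are below) =====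
def Claim_equal_compute_ranges_hierarchical : Prop := ∀ (flat_items : List (List (String × Option Int))) (doc_page_count : Int), Dom_compute_ranges_hierarchical flat_items doc_page_count → Pre_compute_ranges_hierarchical flat_items doc_page_count → Spec_compute_ranges_hierarchical flat_items doc_page_count (compute_ranges_hierarchical flat_items doc_page_count)

-- ===== LEMMAS AND PROOFS =====

-- the common per-index description of the result
def outAt (doc : Int) (s : List pvItem) (i : Nat) : pvItem :=
  let itm := s.getD i []
  let e := aScan (pvLevel itm) (pvStart itm) doc (s.drop (i + 1))
  pvSetEnd itm (if e < pvStart itm then pvStart itm else e)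

def modelA (doc : Int) (s : List pvItem) : List pvItem := (List.range s.length).map (outAt doc s)

-- last frontier entry with level ≤ L, and the frontier invariant of B's sweep
def lastLE (front : List (Int × Int)) (L : Int) : Option (Int × Int) :=
  (front.takeWhile (fun p => decide (p.1 ≤ L))).getLast?

def FrontInv (front : List (Int × Int)) (suf : List pvItem) : Prop :=
  front.Pairwise (fun a b => a.1 < b.1) ∧
  ∀ L : Int, ((suf.find? (fun x => decide (pvLevel x ≤ L))).map pvStart) = ((lastLE front L).map Prod.snd)

theorem a_fold_aux (doc : Int) (s : List pvItem) :
    ∀ m k, k + m = s.length →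
      (List.range' k m).foldl (aStep doc) (((List.range k).map (outAt doc s)) ++ s.drop k)
        = modelA doc s := by
  intro m
  induction m with
  | zero =>
      intro k hk
      have hk' : k = s.length := by omega
      subst hk'
      simp [modelA]
  | succ m ih =>
      intro k hk
      have hklt : k < s.length := by omega
      rw [List.range'_succ, List.foldl_cons]
      set P := (List.range k).map (outAt doc s) with hP
      have hlen : P.length = k := by simp [hP]
      set r := s.drop (k + 1) with hr
      set x := s.getD k [] with hxg
      have hx : x = s[k] := by simp [hxg, List.getD_eq_getElem?_getD, List.getElem?_eq_getElem hklt]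
      have hdropk : s.drop k = x :: r := by rw [hx, hr]; exact List.drop_eq_getElem_cons hklt
      have hgetD : (P ++ s.drop k).getD k [] = x := by
        rw [hdropk, List.getD_eq_getElem?_getD, List.getElem?_append_right (by omega), hlen]
        simp
      have hdrop : (P ++ s.drop k).drop (k + 1) = r := by
        rw [hdropk, show k + 1 = P.length + 1 from by rw [hlen], List.drop_append]
        simp
      have hset : ∀ v, (P ++ s.drop k).set k v = P ++ v :: r := by
        intro v
        rw [hdropk, List.set_append, if_neg (by omega), hlen]
        simp
      have hstep : aStep doc (P ++ s.drop k) k = ((List.range (k+1)).map (outAt doc s)) ++ r := by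
        unfold aStep
        rw [hgetD, hdrop, hset]
        rw [List.range_succ, List.map_append]
        simp only [List.map_cons, List.map_nil, List.append_assoc, List.singleton_append, ← hP]
        rfl
      rw [hstep]
      have := ih (k + 1) (by omega)
      rw [← hr] at this
      exact this

theorem a_fold_eq (doc : Int) (s : List pvItem) :
    (List.range s.length).foldl (aStep doc) s = modelA doc s := by
  have := a_fold_aux doc s s.length 0 (by omega)
  simpa [List.range_eq_range'] using this

-- small takeWhile / bPop / bSearch lemmas
theorem tw_append_false {α : Type} (p : α → Bool) (xs : List α) (x : α) (hx : p x = false) :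
    (xs ++ [x]).takeWhile p = xs.takeWhile p := by
  induction xs with
  | nil => simp [List.takeWhile, hx]
  | cons a t ih =>
      simp only [List.cons_append, List.takeWhile_cons]
      cases hpa : p a <;> simp [ih]

theorem tw_all {α : Type} (p : α → Bool) (l : List α) (h : ∀ x ∈ l, p x = true) :
    l.takeWhile p = l := by
  induction l with
  | nil => rfl
  | cons a t ih =>
      rw [List.takeWhile_cons, h a (by simp)]
      simp [ih (fun x hx => h x (by simp [hx]))]

theorem tw_tw {α : Type} (p q : α → Bool) (l : List α) (h : ∀ x, p x = true → q x = true) :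
    (l.takeWhile q).takeWhile p = l.takeWhile p := by
  induction l with
  | nil => rfl
  | cons a t ih =>
      rw [List.takeWhile_cons]
      cases hqa : q a with
      | true => simp only [List.takeWhile_cons]; cases hpa : p a <;> simp [hpa, ih]
      | false =>
          have hpa : p a = false := by
            cases hpa : p a with
            | true => exact absurd (h a hpa) (by simp [hqa])
            | false => rfl
          simp [hpa]

theorem tw_next {α : Type} (p : α → Bool) (l : List α) {x : α}
    (h : l[(l.takeWhile p).length]? = some x) : p x = false := by
  induction l generalizing x with
  | nil => simp at h
  | cons a t ih =>
      rw [List.takeWhile_cons] at h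
      cases hpa : p a with
      | false => simp [hpa] at h; subst h; exact hpa
      | true => rw [hpa] at h; exact ih h

theorem tw_getElem {α : Type} (p : α → Bool) (l : List α) (j : Nat)
    (h : j < (l.takeWhile p).length) :
    (l.takeWhile p)[j] = l[j]'(lt_of_lt_of_le h (List.takeWhile_prefix p).length_le) := by
  exact (List.takeWhile_prefix p).getElem h

theorem bPop_eq (L : Int) (f : List (Int × Int)) (hp : f.Pairwise (fun a b => a.1 < b.1)) :
    bPop L f = f.takeWhile (fun p => decide (p.1 < L)) := by
  induction f using List.reverseRecOn with
  | nil => simp [bPop]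
  | append_singleton xs x ih =>
      have hne : xs ++ [x] ≠ [] := by simp
      rw [bPop, dif_pos hne]
      have hlast : (xs ++ [x]).getLast hne = x := by simp
      rw [hlast]
      have hp' : xs.Pairwise (fun a b => a.1 < b.1) := (List.pairwise_append.mp hp).1
      by_cases hge : x.1 ≥ L
      · rw [if_pos hge, List.dropLast_concat]
        rw [ih hp', tw_append_false _ _ _ (by simpa using by omega)]
      · rw [if_neg hge]
        have hall : ∀ y ∈ xs ++ [x], (fun p => decide (p.1 < L)) y = true := by
          intro y hy
          rcases List.mem_append.mp hy with h1 | h1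
          · have := (List.pairwise_append.mp hp).2.2 y h1 x (by simp)
            simp; omega
          · simp at h1; subst h1; simp; omega
        rw [tw_all _ _ hall]

theorem tw_char (f : List (Int × Int)) (L : Int) (hp : f.Pairwise (fun a b => a.1 < b.1))
    (j : Nat) (hj : j < f.length) :
    (f[j].1 ≤ L ↔ j < (f.takeWhile (fun p => decide (p.1 ≤ L))).length) := by
  set K := (f.takeWhile (fun p => decide (p.1 ≤ L))).length with hK
  constructor
  · intro hle
    by_contra hnot
    have hKj : K ≤ j := by omega
    have hKlt : K < f.length := by omega
    have hfK : ¬ (f[K].1 ≤ L) := by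
      have := tw_next (fun p => decide (p.1 ≤ L)) f (x := f[K]) (by rw [List.getElem?_eq_getElem hKlt])
      simpa using this
    have hmono : f[K].1 ≤ f[j].1 := by
      rcases Nat.eq_or_lt_of_le hKj with h | h
      · simp [h]
      · exact le_of_lt ((List.pairwise_iff_getElem.mp hp) K j hKlt hj h)
    omega
  · intro hjK
    have hjtw : j < (f.takeWhile (fun p => decide (p.1 ≤ L))).length := hjK
    have hmem : (f.takeWhile (fun p => decide (p.1 ≤ L)))[j] ∈ f.takeWhile (fun p => decide (p.1 ≤ L)) :=
      List.getElem_mem _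
    have := List.mem_takeWhile_imp hmem
    rw [tw_getElem _ _ _ hjtw] at this
    simpa using this

theorem bSearch_eq (f : List (Int × Int)) (L : Int) (hp : f.Pairwise (fun a b => a.1 < b.1)) :
    ∀ d lo hi, hi - lo ≤ d → hi ≤ f.length →
      lo ≤ (f.takeWhile (fun p => decide (p.1 ≤ L))).length →
      (f.takeWhile (fun p => decide (p.1 ≤ L))).length ≤ hi →
      bSearch f L lo hi = (f.takeWhile (fun p => decide (p.1 ≤ L))).length := by
  intro d
  induction d with
  | zero =>
      intro lo hi hd hhi hlo hK
      rw [bSearch, dif_neg (by omega)]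
      omega
  | succ d ih =>
      intro lo hi hd hhi hlo hK
      rw [bSearch]
      by_cases hlh : lo < hi
      · rw [dif_pos hlh]
        have hmid : (lo + hi) / 2 < hi := by omega
        have hmidlt : (lo + hi) / 2 < f.length := by omega
        have hgd : (f.getD ((lo + hi) / 2) (0, 0)) = f[(lo + hi) / 2] := by
          rw [List.getD_eq_getElem?_getD, List.getElem?_eq_getElem hmidlt]; rfl
        simp only [hgd]
        by_cases hc : f[(lo + hi) / 2].1 ≤ L
        · rw [if_pos hc]
          have := (tw_char f L hp _ hmidlt).mp hc
          exact ih ((lo + hi) / 2 + 1) hi (by omega) hhi (by omega) hK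
        · rw [if_neg hc]
          have : ¬ ((lo + hi) / 2 < (f.takeWhile (fun p => decide (p.1 ≤ L))).length) := by
            intro hlt
            exact hc ((tw_char f L hp _ hmidlt).mpr hlt)
          exact ih lo ((lo + hi) / 2) (by omega) (by omega) hlo (by omega)
      · rw [dif_neg hlh]; omega

theorem aScan_skip (lvl S doc : Int) (m : List pvItem) (hm : ∀ x ∈ m, pvStart x = S)
    (r : List pvItem) : aScan lvl S doc (m ++ r) = aScan lvl S doc r := by
  induction m with
  | nil => rfl
  | cons a t ih =>
      rw [List.cons_append, aScan, if_neg]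
      · exact ih (fun x hx => hm x (by simp [hx]))
      · rw [hm a (by simp)]
        exact fun hc => absurd hc.2 (lt_irrefl S)

theorem aScan_find (lvl S doc : Int) (r : List pvItem) (hr : ∀ y ∈ r, S < pvStart y) :
    aScan lvl S doc r = (match r.find? (fun x => decide (pvLevel x ≤ lvl)) with
      | some x => pvStart x - 1 | none => doc - 1) := by
  induction r with
  | nil => rfl
  | cons a t ih =>
      rw [aScan, List.find?_cons]
      by_cases hc : pvLevel a ≤ lvl
      · rw [if_pos ⟨hc, hr a (by simp)⟩]
        simp [hc]
      · rw [if_neg (by tauto)]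
        simp only [hc, decide_false]
        exact ih (fun y hy => hr y (by simp [hy]))

theorem find?_map_start (p : pvItem → Bool) (G : List pvItem) (S : Int)
    (hG : ∀ x ∈ G, pvStart x = S) :
    ((G.find? p).map pvStart) = if G.any p then some S else none := by
  induction G with
  | nil => simp
  | cons a t ih =>
      rw [List.find?_cons]
      cases hpa : p a with
      | true => simp [hpa, hG a (by simp)]
      | false => simp only [hpa, List.any_cons, Bool.false_or]
                 exact ih (fun x hx => hG x (by simp [hx]))

theorem lastLE_push (f : List (Int × Int)) (l s L : Int) :
    lastLE (f.takeWhile (fun p => decide (p.1 < l)) ++ [(l, s)]) L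
      = if l ≤ L then some (l, s) else lastLE f L := by
  unfold lastLE
  by_cases hl : l ≤ L
  · rw [if_pos hl, tw_all, List.getLast?_concat]
    intro x hx
    rcases List.mem_append.mp hx with h | h
    · have := List.mem_takeWhile_imp h
      simp at this ⊢; omega
    · simp at h; subst h; simpa
  · rw [if_neg hl, tw_append_false _ _ _ (by simp; omega),
      tw_tw _ _ _ (fun x hx => by simp at hx ⊢; omega)]

theorem pairwise_push (f : List (Int × Int)) (hp : f.Pairwise (fun a b => a.1 < b.1)) (l s : Int) :
    (f.takeWhile (fun p => decide (p.1 < l)) ++ [(l, s)]).Pairwise (fun a b => a.1 < b.1) := by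
  rw [List.pairwise_append]
  refine ⟨hp.sublist (List.takeWhile_sublist _), by simp, ?_⟩
  intro a ha b hb
  have := List.mem_takeWhile_imp ha
  simp at hb this
  simp [hb, this]

theorem bPush_eq (f : List (Int × Int)) (hp : f.Pairwise (fun a b => a.1 < b.1)) (itm : pvItem) :
    bPush f itm = f.takeWhile (fun p => decide (p.1 < pvLevel itm)) ++ [(pvLevel itm, pvStart itm)] := by
  unfold bPush; rw [bPop_eq _ _ hp]

theorem pairwise_fold (G : List pvItem) (f : List (Int × Int))
    (hp : f.Pairwise (fun a b => a.1 < b.1)) :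
    (G.foldl bPush f).Pairwise (fun a b => a.1 < b.1) := by
  induction G generalizing f with
  | nil => exact hp
  | cons a t ih =>
      rw [List.foldl_cons, bPush_eq _ hp]
      exact ih _ (pairwise_push _ hp _ _)

theorem lastLE_fold (G : List pvItem) (S : Int) (hG : ∀ x ∈ G, pvStart x = S)
    (f : List (Int × Int)) (hp : f.Pairwise (fun a b => a.1 < b.1)) (L : Int) :
    (lastLE (G.foldl bPush f) L).map Prod.snd
      = if G.any (fun x => decide (pvLevel x ≤ L)) then some S
        else (lastLE f L).map Prod.snd := by
  induction G using List.reverseRecOn with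
  | nil => simp
  | append_singleton ys x ih =>
      rw [List.foldl_append, List.foldl_cons, List.foldl_nil,
        bPush_eq _ (pairwise_fold _ _ hp), lastLE_push]
      by_cases hc : pvLevel x ≤ L
      · rw [if_pos hc]
        rw [if_pos (by simp [List.any_append]; right; simpa)]
        simp [hG x (by simp)]
      · rw [if_neg hc, ih (fun y hy => hG y (by simp [hy]))]
        have : (ys ++ [x]).any (fun x => decide (pvLevel x ≤ L)) = ys.any (fun x => decide (pvLevel x ≤ L)) := by
          simp [List.any_append, hc]
        rw [this]

theorem frontinv_fold (front : List (Int × Int)) (R : List pvItem)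
    (hinv : FrontInv front R) (G : List pvItem) (S : Int) (hG : ∀ x ∈ G, pvStart x = S) :
    FrontInv (G.foldl bPush front) (G ++ R) := by
  refine ⟨pairwise_fold _ _ hinv.1, ?_⟩
  intro L
  rw [lastLE_fold G S hG front hinv.1 L, List.find?_append]
  by_cases hany : G.any (fun x => decide (pvLevel x ≤ L))
  · rw [if_pos hany]
    have := find?_map_start (fun x => decide (pvLevel x ≤ L)) G S hG
    rw [if_pos hany] at this
    rcases Option.map_eq_some_iff.mp this with ⟨x, hx, hxs⟩
    simp [hx, hxs]
  · rw [if_neg hany]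
    have hnone : G.find? (fun x => decide (pvLevel x ≤ L)) = none := by
      rw [List.find?_eq_none]
      intro x hx
      by_contra hc
      exact hany (List.any_of_mem hx (by simpa using hc))
    rw [hnone]
    simpa using hinv.2 L

theorem getOpt_setEnd (it : pvItem) (e : Int) (k : String) (hk : k ≠ "end") :
    pvGetOpt (pvSetEnd it e) k = pvGetOpt it k := by
  unfold pvGetOpt pvSetEnd
  show ((PySem.Dict.mk it).insert "end" (some e)).getD k none = (PySem.Dict.mk it).getD k none
  rw [PySem.Dict.getD_insert]
  exact if_neg hk

theorem start_setEnd (it : pvItem) (e : Int) : pvStart (pvSetEnd it e) = pvStart it := by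
  unfold pvStart; rw [getOpt_setEnd _ _ _ (by decide)]

theorem level_setEnd (it : pvItem) (e : Int) : pvLevel (pvSetEnd it e) = pvLevel it := by
  unfold pvLevel; rw [getOpt_setEnd _ _ _ (by decide)]

theorem start_bQuery (doc : Int) (f : List (Int × Int)) (itm : pvItem) :
    pvStart (bQuery doc f itm) = pvStart itm := by
  unfold bQuery; rw [start_setEnd]

theorem level_bQuery (doc : Int) (f : List (Int × Int)) (itm : pvItem) :
    pvLevel (bQuery doc f itm) = pvLevel itm := by
  unfold bQuery; rw [level_setEnd]

theorem find?_map_proj (G : List pvItem) (h : pvItem → pvItem) (L : Int)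
    (hs : ∀ x ∈ G, pvStart (h x) = pvStart x) (hl : ∀ x ∈ G, pvLevel (h x) = pvLevel x) :
    ((G.map h).find? (fun x => decide (pvLevel x ≤ L))).map pvStart
      = (G.find? (fun x => decide (pvLevel x ≤ L))).map pvStart := by
  induction G with
  | nil => rfl
  | cons a t ih =>
      rw [List.map_cons, List.find?_cons, List.find?_cons, hl a (by simp)]
      cases hc : decide (pvLevel a ≤ L)
      · exact ih (fun x hx => hs x (by simp [hx])) (fun x hx => hl x (by simp [hx]))
      · simp [hs a (by simp)]

theorem bQuery_eq (doc : Int) (front : List (Int × Int)) (itm : pvItem) (R : List pvItem)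
    (hinv : FrontInv front R) (hR : ∀ y ∈ R, pvStart itm < pvStart y) :
    bQuery doc front itm
      = pvSetEnd itm
          (if aScan (pvLevel itm) (pvStart itm) doc R < pvStart itm then pvStart itm
           else aScan (pvLevel itm) (pvStart itm) doc R) := by
  unfold bQuery
  have hKle : (front.takeWhile (fun p => decide (p.1 ≤ pvLevel itm))).length ≤ front.length :=
    (List.takeWhile_prefix _).length_le
  have hbs : bSearch front (pvLevel itm) 0 front.length
      = (front.takeWhile (fun p => decide (p.1 ≤ pvLevel itm))).length :=
    bSearch_eq front (pvLevel itm) hinv.1 front.length 0 front.length (by omega) le_rfl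
      (Nat.zero_le _) hKle
  have hfind := hinv.2 (pvLevel itm)
  rw [aScan_find _ _ _ _ hR]
  set K := (front.takeWhile (fun p => decide (p.1 ≤ pvLevel itm))).length with hKdef
  have hscan : (if K ≠ 0 then (front.getD (K - 1) (0, 0)).2 - 1 else doc - 1)
      = (match R.find? (fun x => decide (pvLevel x ≤ pvLevel itm)) with
         | some x => pvStart x - 1 | none => doc - 1) := by
    by_cases hK0 : K = 0
    · have htw : front.takeWhile (fun p => decide (p.1 ≤ pvLevel itm)) = [] :=
        List.length_eq_zero_iff.mp (by rw [← hKdef]; exact hK0)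
      have hl0 : lastLE front (pvLevel itm) = none := by unfold lastLE; rw [htw]; rfl
      rw [hl0] at hfind
      simp only [Option.map_none] at hfind
      have hfn : R.find? (fun x => decide (pvLevel x ≤ pvLevel itm)) = none := by
        cases hf : R.find? (fun x => decide (pvLevel x ≤ pvLevel itm)) with
        | none => rfl
        | some x => rw [hf] at hfind; simp at hfind
      rw [hfn, if_neg (by omega)]
    · have hklt : K - 1 < (front.takeWhile (fun p => decide (p.1 ≤ pvLevel itm))).length := by
        omega
      have hkfr : K - 1 < front.length := by omega
      have hlast : lastLE front (pvLevel itm)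
          = some ((front.takeWhile (fun p => decide (p.1 ≤ pvLevel itm)))[K - 1]) := by
        unfold lastLE
        rw [List.getLast?_eq_getElem?, ← hKdef]
        simp [List.getElem?_eq_getElem hklt]
      rw [hlast] at hfind
      have hgd : front.getD (K - 1) (0, 0)
          = (front.takeWhile (fun p => decide (p.1 ≤ pvLevel itm)))[K - 1] := by
        rw [List.getD_eq_getElem?_getD, List.getElem?_eq_getElem hkfr, tw_getElem _ _ _ hklt]
        rfl
      rcases Option.map_eq_some_iff.mp hfind with ⟨x, hx, hxs⟩
      rw [hx, if_pos hK0, hgd]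
      simp [← hxs]
  show pvSetEnd itm (if (if bSearch front (pvLevel itm) 0 front.length ≠ 0 then
      (front.getD (bSearch front (pvLevel itm) 0 front.length - 1) (0, 0)).2 - 1
      else doc - 1) ≥ pvStart itm then
      (if bSearch front (pvLevel itm) 0 front.length ≠ 0 then
      (front.getD (bSearch front (pvLevel itm) 0 front.length - 1) (0, 0)).2 - 1
      else doc - 1) else pvStart itm) = _
  rw [hbs, hscan]
  congr 1
  split_ifs with h1 h2 <;> omega

theorem frontinv_map (f : List (Int × Int)) (G R : List pvItem) (h : pvItem → pvItem)
    (hs : ∀ x ∈ G, pvStart (h x) = pvStart x) (hl : ∀ x ∈ G, pvLevel (h x) = pvLevel x)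
    (hi : FrontInv f (G.map h ++ R)) : FrontInv f (G ++ R) := by
  refine ⟨hi.1, ?_⟩
  intro L
  have h2 := hi.2 L
  rw [List.find?_append] at h2 ⊢
  have hproj := find?_map_proj G h L hs hl
  cases hg : G.find? (fun x => decide (pvLevel x ≤ L)) with
  | none =>
      have hmapnone : (G.map h).find? (fun x => decide (pvLevel x ≤ L)) = none := by
        have hp2 := hproj
        rw [hg] at hp2
        simp only [Option.map_none] at hp2
        exact Option.map_eq_none_iff.mp hp2
      rw [hmapnone] at h2
      exact h2
  | some x =>
      have hp2 : Option.map pvStart ((G.map h).find? (fun x => decide (pvLevel x ≤ L)))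
          = some (pvStart x) := by rw [hproj, hg]; rfl
      rcases Option.map_eq_some_iff.mp hp2 with ⟨y, hy, hys⟩
      rw [hy] at h2
      simp only [Option.some_or, Option.map_some] at h2 ⊢
      rw [← hys]
      exact h2

theorem bG_congr (t s : List pvItem) (S : Int) :
    ∀ g, (∀ j, j < g → t.getD j [] = s.getD j []) → bG t S g = bG s S g := by
  intro g
  induction g with
  | zero => intro; rfl
  | succ g ih =>
      intro h
      rw [bG, bG, h g (by omega)]
      split
      · exact ih (fun j hj => h j (by omega))
      · rfl

theorem bG_start (items : List pvItem) (S : Int) :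
    ∀ g j, bG items S g ≤ j → j < g → pvStart (items.getD j []) = S := by
  intro g
  induction g with
  | zero => intro j _ hj; omega
  | succ g ih =>
      intro j h1 h2
      rw [bG] at h1
      by_cases hc : pvStart (items.getD g []) = S
      · rw [if_pos hc] at h1
        rcases Nat.lt_or_ge j g with h | h
        · exact ih j h1 h
        · have : j = g := by omega
          rw [this]; exact hc
      · rw [if_neg hc] at h1; omega

theorem bG_prev (items : List pvItem) (S : Int) :
    ∀ g, 0 < bG items S g → pvStart (items.getD (bG items S g - 1) []) ≠ S := by
  intro g
  induction g with
  | zero => intro h; simp [bG] at h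
  | succ g ih =>
      intro h
      rw [bG] at h ⊢
      by_cases hc : pvStart (items.getD g []) = S
      · rw [if_pos hc] at h ⊢; exact ih h
      · rw [if_neg hc] at h ⊢; simpa using hc

theorem getD_eq_get (s : List pvItem) (j : Nat) (h : j < s.length) : s.getD j [] = s[j] := by
  rw [List.getD_eq_getElem?_getD, List.getElem?_eq_getElem h]; rfl

theorem outAt_def (doc : Int) (s : List pvItem) (i : Nat) :
    outAt doc s i = pvSetEnd (s.getD i [])
      (if aScan (pvLevel (s.getD i [])) (pvStart (s.getD i [])) doc (s.drop (i + 1))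
          < pvStart (s.getD i []) then pvStart (s.getD i [])
       else aScan (pvLevel (s.getD i [])) (pvStart (s.getD i [])) doc (s.drop (i + 1))) := rfl

theorem b_main_eq (doc : Int) (s : List pvItem)
    (hs : s.Pairwise (fun a b => pvStart a ≤ pvStart b)) :
    ∀ fuel front, fuel ≤ s.length →
      (∀ x ∈ s.drop fuel, 0 < fuel → pvStart (s.getD (fuel - 1) []) < pvStart x) →
      FrontInv front (s.drop fuel) →
      bMain doc fuel (s.take fuel ++ (List.range' fuel (s.length - fuel)).map (outAt doc s)) front
        = modelA doc s := by
  intro fuel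
  induction fuel using Nat.strongRecOn with
  | _ fuel ih =>
  rcases fuel with _ | i
  · intro front _ _ _
    rw [bMain]
    simp [modelA, List.range_eq_range']
  · intro front hfn h2 hinv
    have hilt : i < s.length := by omega
    set A := s.take (i + 1) with hA
    set tail := (List.range' (i + 1) (s.length - (i + 1))).map (outAt doc s) with htail
    have hAlen : A.length = i + 1 := by rw [hA]; simp; omega
    -- prefix agreement between the loop state and s
    have hgetD_t : ∀ j, j < i + 1 → (A ++ tail).getD j [] = s.getD j [] := by
      intro j hj
      rw [List.getD_eq_getElem?_getD, List.getD_eq_getElem?_getD,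
        List.getElem?_append_left (by omega), hA, List.getElem?_take_of_lt hj]
    have hSdef : pvStart ((A ++ tail).getD i []) = pvStart (s.getD i []) := by
      rw [hgetD_t i (by omega)]
    -- pairwise starts at index level
    have hmono : ∀ p q (hpq : p ≤ q) (hq : q < s.length),
        pvStart (s[p]'(Nat.lt_of_le_of_lt hpq hq)) ≤ pvStart s[q] := by
      intro p q hpq hq
      rcases Nat.eq_or_lt_of_le hpq with h | h
      · subst h; exact le_refl _
      · exact (List.pairwise_iff_getElem.mp hs) p q (by omega) hq h
    -- the group boundary g
    have hgcong : bG (A ++ tail) (pvStart ((A ++ tail).getD i [])) i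
        = bG s (pvStart (s.getD i [])) i := by
      rw [hSdef]
      exact bG_congr _ _ _ i (fun j hj => hgetD_t j (by omega))
    set S := pvStart (s.getD i []) with hS
    set g := bG s S i with hg
    have hgle : g ≤ i := bG_le s S i
    have hGmem : ∀ j, g ≤ j → j ≤ i → pvStart (s.getD j []) = S := by
      intro j h1 h3
      rcases Nat.lt_or_ge j i with h | h
      · exact bG_start s S i j h1 h
      · have : j = i := by omega
        rw [this, hS]
    have hgprev : 0 < g → pvStart (s.getD (g - 1) []) ≠ S := fun h => bG_prev s S i (hg ▸ h)
    -- index-level start facts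
    have hidx : ∀ j (h1 : g ≤ j) (h3 : j ≤ i), pvStart (s[j]'(by omega)) = S := by
      intro j h1 h3
      rw [← getD_eq_get s j (by omega)]
      exact hGmem j h1 h3
    -- the group slice and the strict suffix
    set R := s.drop (i + 1) with hR
    have hRmem : ∀ y ∈ R, S < pvStart y := by
      intro y hy
      have := h2 y (by rw [hR] at hy; simpa using hy) (by omega)
      simpa [hS] using this
    -- membership start facts for any sub-slice of the group
    have hslice : ∀ a, g ≤ a → ∀ x ∈ A.drop a, pvStart x = S := by
      intro a ha x hx
      obtain ⟨k, hk, hkx⟩ := List.getElem_of_mem hx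
      have hak : a + k < i + 1 := by
        have := hk
        rw [List.length_drop, hAlen] at this
        omega
      have hq : s[a + k]? = some x := by
        rw [← List.getElem?_drop]
        rw [show s.drop a = A.drop a ++ R from by
          conv_lhs => rw [← List.take_append_drop (i + 1) s]
          rw [List.drop_append_of_le_length (by rw [List.length_take]; omega), hA, hR]]
        rw [List.getElem?_append_left (by omega), List.getElem?_eq_getElem hk, hkx]
      have haklen : a + k < s.length := by omega
      rw [List.getElem?_eq_getElem haklen] at hq
      rw [← Option.some.inj hq]
      exact hidx (a + k) (by omega) (by omega)
    have hdropg : ∀ a, g ≤ a → a ≤ i + 1 → s.drop a = A.drop a ++ R := by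
      intro a _ ha2
      conv_lhs => rw [← List.take_append_drop (i + 1) s]
      rw [List.drop_append_of_le_length (by rw [List.length_take]; omega), hA, hR]
    rw [bMain, hgcong]
    -- identify the four list computations
    have e_take : (A ++ tail).take g = s.take g := by
      rw [List.take_append_of_le_length (by omega), hA, List.take_take,
        min_eq_left (by omega)]
    have e_dropi : (A ++ tail).drop (i + 1) = tail := by
      rw [show i + 1 = A.length from hAlen.symm, List.drop_left]
    have e_dropg : (A ++ tail).drop g = A.drop g ++ tail :=
      List.drop_append_of_le_length (by omega)
    have e_seg0 : ((A ++ tail).drop g).take (i + 1 - g) = A.drop g := by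
      rw [e_dropg, List.take_append_of_le_length (by rw [List.length_drop]; omega),
        List.take_of_length_le (by rw [List.length_drop]; omega)]
    have hAelem : ∀ k (hk : k < (A.drop g).length), (A.drop g)[k] = s[g + k]'(by
        rw [List.length_drop, hAlen] at hk; omega) := by
      intro k hk
      have hgk : g + k < i + 1 := by rw [List.length_drop, hAlen] at hk; omega
      have hq : (A.drop g)[k]? = s[g + k]? := by
        rw [List.getElem?_drop, hA, List.getElem?_take_of_lt hgk]
      rw [List.getElem?_eq_getElem hk, List.getElem?_eq_getElem (by omega)] at hq
      exact Option.some.inj hq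
    have hseg : (A.drop g).map (bQuery doc front)
        = (List.range' g (i + 1 - g)).map (outAt doc s) := by
      apply List.ext_getElem
      · simp [hAlen]
      · intro k hk1 hk2
        rw [List.getElem_map, List.getElem_map, List.getElem_range']
        simp only [Nat.one_mul]
        have hklt : k < (A.drop g).length := by simpa using hk1
        have hgk : g + k < i + 1 := by rw [List.length_drop, hAlen] at hklt; omega
        rw [hAelem k hklt]
        have hx : pvStart (s[g + k]'(by omega)) = S := hidx (g + k) (by omega) (by omega)
        rw [bQuery_eq doc front _ R hinv (by rw [hx]; exact hRmem)]
        have hdec : s.drop (g + k + 1) = A.drop (g + k + 1) ++ R :=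
          hdropg (g + k + 1) (by omega) (by omega)
        rw [outAt_def, getD_eq_get s (g + k) (by omega), hdec,
          aScan_skip _ _ _ _ (by
            intro y hy
            rw [hx]
            exact hslice (g + k + 1) (by omega) y hy)]
    rw [e_take, e_dropi, e_seg0, hseg]
    -- the new frontier invariant
    have hfold : FrontInv (((List.range' g (i + 1 - g)).map (outAt doc s)).foldl bPush front)
        (s.drop g) := by
      rw [← hseg]
      have h1 : FrontInv (((A.drop g).map (bQuery doc front)).foldl bPush front)
          ((A.drop g).map (bQuery doc front) ++ R) := by
        apply frontinv_fold front R hinv _ S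
        intro x hx
        rcases List.mem_map.mp hx with ⟨y, hy, hyx⟩
        rw [← hyx, start_bQuery]
        exact hslice g (le_refl g) y hy
      have h3 := frontinv_map _ (A.drop g) R (bQuery doc front)
        (fun x _ => start_bQuery doc front x) (fun x _ => level_bQuery doc front x) h1
      rw [hdropg g (le_refl g) (by omega)]
      exact h3
    -- assemble the state for the recursive call
    have hstate : s.take g ++ (List.range' g (i + 1 - g)).map (outAt doc s) ++ tail
        = s.take g ++ (List.range' g (s.length - g)).map (outAt doc s) := by
      have h9 : List.range' g (i + 1 - g) ++ List.range' (i + 1) (s.length - (i + 1))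
          = List.range' g (s.length - g) := by
        have h8 : i + 1 = g + (i + 1 - g) := by omega
        calc List.range' g (i + 1 - g) ++ List.range' (i + 1) (s.length - (i + 1))
            = List.range' g (i + 1 - g) ++ List.range' (g + (i + 1 - g)) (s.length - (i + 1)) := by
              rw [← h8]
          _ = List.range' g ((i + 1 - g) + (s.length - (i + 1))) := by rw [List.range'_append_1]
          _ = List.range' g (s.length - g) := by congr 1; omega
      rw [List.append_assoc, htail, ← List.map_append, h9]
    rw [hstate]
    -- hypotheses of the recursive call
    have h2' : ∀ x ∈ s.drop g, 0 < g → pvStart (s.getD (g - 1) []) < pvStart x := by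
      intro x hx hpos
      have hlt : pvStart (s.getD (g - 1) []) < S := by
        have hle : pvStart (s.getD (g - 1) []) ≤ S := by
          rw [getD_eq_get s (g - 1) (by omega)]
          calc pvStart (s[g - 1]'(by omega)) ≤ pvStart (s[i]'(by omega)) :=
                hmono (g - 1) i (by omega) (by omega)
            _ = S := by rw [hS, getD_eq_get s i (by omega)]
        have := hgprev hpos
        omega
      rw [hdropg g (le_refl g) (by omega)] at hx
      rcases List.mem_append.mp hx with h | h
      · rw [hslice g (le_refl g) x h]; exact hlt
      · exact lt_trans hlt (hRmem x h)
    exact ih g (by omega) _ (by omega) h2' hfold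

-- ===== VERDICT (by name: the statement is the Claim_ definition above) =====
theorem compute_ranges_hierarchical_spec : Claim_equal_compute_ranges_hierarchical := by
  intro flat_items doc _ _
  unfold Spec_compute_ranges_hierarchical
  unfold compute_ranges_hierarchical compute_ranges_hierarchical_alt
  set s := PySem.List.sorted (flat_items.filter (fun it => (pvGetOpt it "start").isSome)) (fun x => pvStart x) false with hsdef
  have hs : s.Pairwise (fun a b => pvStart a ≤ pvStart b) := PySem.List.sorted_pairwise _ _
  have h1 : (List.range s.length).foldl (aStep doc) s = modelA doc s := a_fold_eq doc s
  have h2 : bMain doc s.length s [] = modelA doc s := by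
    have := b_main_eq doc s hs s.length [] (le_refl _)
      (by simp) (by constructor <;> simp [lastLE])
    simpa using this
  simp only [h1, h2]
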